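-- pv_equiv track=rewrite | github.com/Synexiun/psy | services/api/tests/psychometric/test_dast10_scoring.py | _baseline_items
-- ===== SOURCE A (Python) =====
-- _REVERSE_POS_0IDX = {2}
--
-- def _baseline_items(overrides: dict[int, int] | None = None) -> list[int]:
--     """Construct a 10-item raw response list that scores 0 before overrides.
--
--     The reverse-scored position (item 3, 0-idx 2) defaults to raw 1
--     ("yes, always able to stop") → scored 0.  Non-reverse positions
--     default to raw 0.  Overriding a 0-indexed position sets that
--     position to a specific raw value, isolating the contribution of
--     each item in reverse-scoring tests — no noise from unmodified
--     items.
--     """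
--     items: list[int] = []
--     for i in range(10):
--         if overrides and i in overrides:
--             items.append(overrides[i])
--         elif i in _REVERSE_POS_0IDX:
--             items.append(1)
--         else:
--             items.append(0)
--     return items
-- ===== SOURCE B (Python) =====
-- def _baseline_items(overrides=None):
--     # Constant base list plus a sparse update pass over the overrides,
--     # instead of a per-position branch for all 10 positions.
--     items = [0] * 10
--     items[2] = 1
--     for k, v in (overrides or {}).items():
--         if 0 <= k < 10:
--             items[k] = v
--     return items
-- ===== Notes on version B (the rewrite author's own statement) =====
-- stated objective: simpler
-- what changed: B builds the constant default response list directly (all zeros with the reverse-scored third position set to one) and then applies the overrides as a sparse in-place update pass that skips out-of-range keys, instead of A's ten-iteration loop that branches on a dict membership test and lookup at every position.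
import Mathlib
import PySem

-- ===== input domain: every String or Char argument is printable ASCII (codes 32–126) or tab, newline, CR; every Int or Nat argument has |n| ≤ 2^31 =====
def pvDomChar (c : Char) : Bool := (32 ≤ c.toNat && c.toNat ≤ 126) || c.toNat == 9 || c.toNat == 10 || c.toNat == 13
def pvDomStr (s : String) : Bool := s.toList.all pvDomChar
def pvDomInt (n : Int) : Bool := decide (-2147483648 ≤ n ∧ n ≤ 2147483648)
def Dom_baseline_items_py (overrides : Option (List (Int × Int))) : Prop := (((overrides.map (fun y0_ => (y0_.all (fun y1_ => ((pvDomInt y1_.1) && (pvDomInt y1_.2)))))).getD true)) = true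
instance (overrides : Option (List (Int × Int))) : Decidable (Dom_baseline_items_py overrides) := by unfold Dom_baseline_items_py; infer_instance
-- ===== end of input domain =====

-- B replaces A's per-position 10-way branch loop by a constant default list plus a
-- sparse in-range override pass (objective: simpler).

-- ===== PORT A =====
-- the dict parameter is modelled as PySem.Dict.ofList of the association list
-- (Python dict construction: last duplicate wins, first position kept);
-- 'overrides and i in overrides' = dict truthiness (nonempty) && membership;
-- 'overrides[i]' is guarded by the membership test, so getD is exact here.
def baseline_items_py (overrides : Option (List (Int × Int))) : List Int :=
  let d : PySem.Dict Int Int := PySem.Dict.ofList (overrides.getD [])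
  (PySem.List.pyRange 0 10 1).foldl
    (fun items i =>
      if d.size ≠ 0 ∧ d.contains i then items ++ [d.getD i 0]
      else if i == 2 then items ++ [(1 : Int)]
      else items ++ [(0 : Int)]) []

-- ===== PORT B =====
-- '(overrides or {}).items()' = items of the dict built from the list;
-- 'items[k] = v' on 0 ≤ k < 10 is List.set at k.toNat (k nonnegative there).
def baseline_items_py_alt (overrides : Option (List (Int × Int))) : List Int :=
  let base : List Int := (List.replicate 10 (0 : Int)).set 2 1
  (PySem.Dict.ofList (overrides.getD [])).items.foldl
    (fun items kv =>
      if 0 ≤ kv.1 ∧ kv.1 < 10 then items.set kv.1.toNat kv.2 else items) base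

-- ===== PRECONDITION & SPEC =====
def Spec_baseline_items_py (overrides : Option (List (Int × Int))) (out : List Int) : Prop := out = baseline_items_py_alt overrides
instance (overrides : Option (List (Int × Int))) (out : List Int) : Decidable (Spec_baseline_items_py overrides out) := by unfold Spec_baseline_items_py; infer_instance

-- ===== CLAIM (what is proved, stated in full; the proofs are below) =====
def Claim_equal_baseline_items_py : Prop := ∀ (overrides : Option (List (Int × Int))), Dom_baseline_items_py overrides → Spec_baseline_items_py overrides (baseline_items_py overrides)

-- ===== LEMMAS AND PROOFS =====

-- the update fold preserves the list length
theorem pv_fold_len (l : List (Int × Int)) (base : List Int) :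
    (l.foldl (fun items kv =>
      if 0 ≤ kv.1 ∧ kv.1 < 10 then items.set kv.1.toNat kv.2 else items) base).length
      = base.length := by
  induction l generalizing base with
  | nil => rfl
  | cons p rest ih =>
    simp only [List.foldl_cons]
    split_ifs with h
    · rw [ih, List.length_set]
    · exact ih base

-- element j of the fold: the value of the (unique) pair keyed j if present, else base[j]
theorem pv_fold_get (l : List (Int × Int)) (base : List Int)
    (hnd : (l.map Prod.fst).Nodup) (j : Nat) (hj : j < 10) (hb : base.length = 10) :
    (l.foldl (fun items kv =>
      if 0 ≤ kv.1 ∧ kv.1 < 10 then items.set kv.1.toNat kv.2 else items) base).getD j 0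
      = ((PySem.Dict.mk l).get? (j : Int)).getD (base.getD j 0) := by
  induction l generalizing base with
  | nil => simp [PySem.Dict.get?]
  | cons p rest ih =>
    obtain ⟨k, v⟩ := p
    simp only [List.map_cons, List.nodup_cons] at hnd
    rw [List.foldl_cons, PySem.Dict.get?_mk_cons]
    by_cases hk : k = (j : Int)
    · have hrange : 0 ≤ k ∧ k < 10 := by omega
      rw [if_pos hrange, if_pos (by simp [hk]),
        ih (base.set k.toNat v) hnd.2 (by simp [hb])]
      have hrest : ({ items := rest } : PySem.Dict Int Int).get? (j : Int) = none := by
        rcases h : ({ items := rest } : PySem.Dict Int Int).get? (j : Int) with _ | w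
        · rfl
        · exfalso
          have hm := PySem.Dict.mem_keys_of_mem_items _
            (PySem.Dict.mem_items_of_get?_eq_some _ h)
          rw [hk] at hnd
          exact hnd.1 (by simpa [PySem.Dict.keys] using hm)
      rw [hrest]
      have hkj : k.toNat = j := by omega
      rw [hkj]
      simp [List.getD_eq_getElem?_getD, List.getElem?_set_self (by omega : j < base.length)]
    · by_cases hr : 0 ≤ k ∧ k < 10
      · rw [if_pos hr, if_neg (show ¬((k == (j : Int)) = true) by simpa using hk),
          ih (base.set k.toNat v) hnd.2 (by simp [hb])]
        have hne : k.toNat ≠ j := by omega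
        rw [List.getD_eq_getElem?_getD (l := base) (i := j) (a := 0), ← List.getElem?_set_ne hne (a := v),
          ← List.getD_eq_getElem?_getD]
      · rw [if_neg hr, if_neg (show ¬((k == (j : Int)) = true) by simpa using hk)]
        exact ih base hnd.2 hb

-- an empty dict contains nothing
theorem pv_size_zero_not_contains (d : PySem.Dict Int Int) (k : Int)
    (h : d.size = 0) : d.contains k = false := by
  obtain ⟨items⟩ := d
  have : items = [] := by simpa [PySem.Dict.size] using h
  subst this
  simp [PySem.Dict.contains]

-- ===== VERDICT (by name: the statement is the Claim_ definition above) =====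
theorem baseline_items_py_spec : Claim_equal_baseline_items_py := by
  intro overrides _
  unfold Spec_baseline_items_py baseline_items_py baseline_items_py_alt
  dsimp only
  set l := overrides.getD [] with hl
  set d := PySem.Dict.ofList l with hd
  have hnd : (d.items.map Prod.fst).Nodup := by
    simpa [PySem.Dict.keys] using PySem.Dict.nodup_keys_ofList (κ := Int) (ν := Int) l
  have hbase : ((List.replicate 10 (0 : Int)).set 2 1).length = 10 := by decide
  have hlen : ((d.items).foldl (fun items kv =>
      if 0 ≤ kv.1 ∧ kv.1 < 10 then items.set kv.1.toNat kv.2 else items)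
      ((List.replicate 10 (0 : Int)).set 2 1)).length = 10 := by
    rw [pv_fold_len]; exact hbase
  have hget : ∀ j : Nat, j < 10 →
      ((d.items).foldl (fun items kv =>
        if 0 ≤ kv.1 ∧ kv.1 < 10 then items.set kv.1.toNat kv.2 else items)
        ((List.replicate 10 (0 : Int)).set 2 1)).getD j 0
      = (d.get? (j : Int)).getD (if j = 2 then 1 else 0) := by
    intro j hj
    have hmk : d = PySem.Dict.mk d.items := rfl
    rw [pv_fold_get d.items _ hnd j hj hbase, ← hmk]
    congr 1
    interval_cases j <;> decide
  have hA : ∀ (i : Int), 0 ≤ i → i < 10 →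
      (if d.size ≠ 0 ∧ d.contains i then d.getD i 0
       else if i == 2 then (1 : Int) else 0)
      = (d.get? i).getD (if i = 2 then 1 else 0) := by
    intro i _ _
    by_cases hc : d.contains i = true
    · have hs : d.size ≠ 0 := by
        intro h0
        rw [pv_size_zero_not_contains d i h0] at hc
        exact Bool.false_ne_true hc
      rw [if_pos ⟨hs, hc⟩, PySem.Dict.getD_eq_get?_getD]
      rcases h : d.get? i with _ | w
      · rw [PySem.Dict.contains_eq_isSome_get?, h] at hc; simp at hc
      · rfl
    · have hn : d.get? i = none := by
        rcases h : d.get? i with _ | w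
        · rfl
        · rw [PySem.Dict.contains_eq_isSome_get?, h] at hc; simp at hc
      rw [if_neg (by simp [hc]), hn]
      by_cases h2 : i = 2 <;> simp [h2]
  -- turn A's append loop into a map over the fixed range
  have hr10 : PySem.List.pyRange 0 10 1 = [0, 1, 2, 3, 4, 5, 6, 7, 8, 9] := by decide
  have hf : (fun (items : List Int) (i : Int) =>
      if d.size ≠ 0 ∧ d.contains i then items ++ [d.getD i 0]
      else if i == 2 then items ++ [(1 : Int)]
      else items ++ [(0 : Int)])
      = fun (items : List Int) (i : Int) => items ++
          [if d.size ≠ 0 ∧ d.contains i then d.getD i 0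
           else if i == 2 then (1 : Int) else 0] := by
    funext items i
    split_ifs <;> rfl
  rw [hr10, hf, PySem.List.foldl_append_singleton_eq_map, List.nil_append]
  -- compare the two 10-element lists element by element
  apply List.ext_getElem
  · simp [pv_fold_len]
  · intro j hjA hjB
    have hj : j < 10 := by simpa using hjA
    have hB : (List.foldl (fun items kv =>
        if 0 ≤ kv.1 ∧ kv.1 < 10 then items.set kv.1.toNat kv.2 else items)
        ((List.replicate 10 (0 : Int)).set 2 1) d.items)[j]
        = (d.get? (j : Int)).getD (if j = 2 then 1 else 0) := by
      rw [← List.getD_eq_getElem _ 0, hget j hj]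
    rw [hB]
    interval_cases j <;>
      simpa using hA _ (by omega) (by omega)
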